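-- pv_equiv track=rewrite | github.com/tdighadw/HXP | DynamicObstacles/HXP_tools.py | count_obs_goal
-- ===== SOURCE A (Python) =====
-- GOAL = [8, 1, 0]
--
-- OBSTACLE = [6, 2, 0]
--
-- def count_obs_goal(l):
--     tmp_obs_cpt = 0
--     tmp_goal_cpt = 0
--     for elm in l:
--         if elm == GOAL:
--             tmp_goal_cpt += 1
--
--         elif elm == OBSTACLE:
--             tmp_obs_cpt += 1
--
--     return tmp_obs_cpt, tmp_goal_cpt
-- ===== SOURCE B (Python) =====
-- GOAL = [8, 1, 0]
--
-- OBSTACLE = [6, 2, 0]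
--
-- def count_obs_goal(l):
--     return l.count(OBSTACLE), l.count(GOAL)
-- ===== Notes on version B (the rewrite author's own statement) =====
-- stated objective: simpler
-- what changed: Replaced the fused single-pass loop with two accumulators by two independent list.count scans, one per marker, returned as a pair.
import Mathlib
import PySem

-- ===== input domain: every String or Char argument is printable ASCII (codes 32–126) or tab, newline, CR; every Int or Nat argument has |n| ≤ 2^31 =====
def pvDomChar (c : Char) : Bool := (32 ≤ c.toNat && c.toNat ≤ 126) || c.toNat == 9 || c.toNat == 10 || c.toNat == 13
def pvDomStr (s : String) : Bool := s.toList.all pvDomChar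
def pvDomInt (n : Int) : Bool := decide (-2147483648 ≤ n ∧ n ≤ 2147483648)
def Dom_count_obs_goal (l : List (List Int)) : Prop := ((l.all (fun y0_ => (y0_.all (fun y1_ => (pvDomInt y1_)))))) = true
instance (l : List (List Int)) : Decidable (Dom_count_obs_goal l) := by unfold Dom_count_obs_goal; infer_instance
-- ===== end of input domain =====

-- B replaces A's fused single-pass loop with two accumulators by two independent list.count scans (simpler decomposition; not claimed faster).


-- ===== PORT A =====
def pvGOAL : List Int := [8, 1, 0]
def pvOBSTACLE : List Int := [6, 2, 0]
def count_obs_goal (l : List (List Int)) : Int × Int :=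
  let st := l.foldl (fun (st : Int × Int) elm =>
    if elm = pvGOAL then (st.1, st.2 + 1)
    else if elm = pvOBSTACLE then (st.1 + 1, st.2)
    else st) (0, 0)
  st

-- ===== PORT B =====
def count_obs_goal_alt (l : List (List Int)) : Int × Int :=
  ((PySem.List.count l pvOBSTACLE : Int), (PySem.List.count l pvGOAL : Int))

-- ===== PRECONDITION & SPEC =====
def Spec_count_obs_goal (l : List (List Int)) (out : Int × Int) : Prop := out = count_obs_goal_alt l
instance (l : List (List Int)) (out : Int × Int) : Decidable (Spec_count_obs_goal l out) := by unfold Spec_count_obs_goal; infer_instance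

-- ===== CLAIM (what is proved, stated in full; the proofs are below) =====
def Claim_equal_count_obs_goal : Prop := ∀ (l : List (List Int)), Dom_count_obs_goal l → Spec_count_obs_goal l (count_obs_goal l)

-- ===== LEMMAS AND PROOFS =====

-- ===== VERDICT (by name: the statement is the Claim_ definition above) =====
theorem pv_fold (l : List (List Int)) (a b : Int) :
    l.foldl (fun (st : Int × Int) elm =>
      if elm = pvGOAL then (st.1, st.2 + 1)
      else if elm = pvOBSTACLE then (st.1 + 1, st.2)
      else st) (a, b)
    = (a + PySem.List.count l pvOBSTACLE, b + PySem.List.count l pvGOAL) := by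
  induction l generalizing a b with
  | nil => simp [PySem.List.count]
  | cons h t ih =>
    simp only [List.foldl_cons, PySem.List.count, List.count_cons] at *
    by_cases hg : h = pvGOAL
    · simp only [hg, ih]
      simp [pvGOAL, pvOBSTACLE]; ring
    · by_cases ho : h = pvOBSTACLE
      · simp only [ho, ih]
        simp [pvGOAL, pvOBSTACLE]
        ring
      · simp only [if_neg hg, if_neg ho, ih]
        simp [beq_iff_eq, Ne.symm, hg, ho]

theorem count_obs_goal_spec : Claim_equal_count_obs_goal := by
  intro l _
  unfold Spec_count_obs_goal count_obs_goal count_obs_goal_alt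
  simp [pv_fold]
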